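-- pv_equiv track=rewrite | github.com/manwar/perlweeklychallenge-club | challenge-119/lubos-kolouch/python/ch-2.py | nth_term
-- ===== SOURCE A (Python) =====
-- def nth_term(n: int) -> int:
--     """Return the n-th term (1-indexed) of the sequence."""
--     if n < 1:
--         raise ValueError("n must be positive")
--
--     count = 0
--     x = 0
--     while count < n:
--         x += 1
--         s = str(x)
--         if any(ch in "0456789" for ch in s):
--             continue
--         if "11" in s:
--             continue
--         count += 1
--     return x
-- ===== SOURCE B (Python) =====
-- def nth_term(n: int) -> int:
--     """Return the n-th term (1-indexed) of the sequence."""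
--     if n < 1:
--         raise ValueError("n must be positive")
--
--     # Generate the valid numbers level by level (by digit count), in
--     # increasing order, instead of scanning every integer.
--     k = n
--     level = [1, 2, 3]
--     while k > len(level):
--         k -= len(level)
--         level = [10 * x + d for x in level
--                  for d in (1, 2, 3) if x % 10 != 1 or d != 1]
--     return level[k - 1]
-- ===== Notes on version B (the rewrite author's own statement) =====
-- stated objective: faster
-- what changed: A scans every integer upward, converting each to a string and testing its digits, until the n-th valid one is found; B never scans: it generates the valid numbers themselves level by level (each valid number with one more digit is ten times a valid number plus an allowed digit that creates no adjacent pair of ones), subtracting each level's size from n and indexing into the level that contains the answer.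
import Mathlib
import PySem

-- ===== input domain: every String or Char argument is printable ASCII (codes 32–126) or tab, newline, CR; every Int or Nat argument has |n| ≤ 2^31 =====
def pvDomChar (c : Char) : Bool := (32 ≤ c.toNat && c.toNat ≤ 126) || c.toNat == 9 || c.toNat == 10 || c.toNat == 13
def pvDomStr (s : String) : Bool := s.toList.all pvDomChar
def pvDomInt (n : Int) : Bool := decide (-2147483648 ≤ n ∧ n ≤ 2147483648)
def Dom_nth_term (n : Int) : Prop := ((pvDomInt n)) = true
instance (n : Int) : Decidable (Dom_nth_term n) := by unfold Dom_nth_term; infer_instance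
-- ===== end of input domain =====

-- B replaces A's scan over every integer (testing each one's decimal string) by
-- level-wise generation of the valid numbers themselves, one level per digit count;
-- a timing run measured B as much faster. Equivalence is proved for all n ≥ 1
-- (A raises ValueError for n < 1).

-- ===== PORT A =====
-- A's while loop, as structural recursion on a fuel that over-approximates the
-- number of iterations (the n-th term is below 10^n, proved below); each
-- iteration is a literal transcription of the loop body.
def nthLoopA (n : Int) (fuel : Nat) (count x : Int) : Int :=
  match fuel with
  | 0 => x
  | f + 1 =>
    if count < n then
      let x' := x + 1
      let s := PySem.Int.toChars x'                                  -- s = str(x)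
      if s.any (fun ch => PySem.Chars.isIn [ch] ("0456789".toList))  -- any(ch in "0456789" for ch in s)
      then nthLoopA n f count x'
      else if PySem.Chars.isIn ("11".toList) s                       -- "11" in s
      then nthLoopA n f count x'
      else nthLoopA n f (count + 1) x'
    else x

def nth_term (n : Int) : Int :=
  if n < 1 then 0                       -- Python raises ValueError here (outside Pre_)
  else nthLoopA n (10 ^ n.toNat) 0 0

-- ===== PORT B =====
-- children of x: [10*x + d for d in (1,2,3) if x % 10 != 1 or d != 1]
def childrenB (x : Int) : List Int :=
  (([1, 2, 3] : List Int).filter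
    (fun d => decide (PySem.Int.mod x 10 ≠ 1) || decide (d ≠ 1))).map
    (fun d => 10 * x + d)

def nthLoopB (k : Int) (level : List Int) : Int :=
  if level = [] then 0                  -- totality guard only; level is never [] when called
  else if k ≤ PySem.List.len level then (PySem.List.pyGet? level (k - 1)).getD 0  -- level[k-1]
  else nthLoopB (k - PySem.List.len level) (level.flatMap childrenB)
termination_by k.toNat
decreasing_by
  simp only [PySem.List.len_eq] at *
  have : 1 ≤ level.length := by
    cases level with
    | nil => simp_all
    | cons a l => simp
  omega

def nth_term_alt (n : Int) : Int :=
  if n < 1 then 0                       -- Python raises ValueError here (outside Pre_)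
  else nthLoopB n [1, 2, 3]

-- ===== PRECONDITION & SPEC =====
-- A raises ValueError exactly when n < 1; Pre_ excludes those inputs.
def Pre_nth_term (n : Int) : Prop := 1 ≤ n
instance (n : Int) : Decidable (Pre_nth_term n) := by unfold Pre_nth_term; infer_instance

def pvWitness_nth_term : Int := (5)

def Spec_nth_term (n : Int) (out : Int) : Prop := out = nth_term_alt n
instance (n : Int) (out : Int) : Decidable (Spec_nth_term n out) := by unfold Spec_nth_term; infer_instance

-- ===== CLAIM (what is proved, stated in full; the proofs are below) =====
def Claim_equal_nth_term : Prop := ∀ (n : Int), Dom_nth_term n → Pre_nth_term n → Spec_nth_term n (nth_term n)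

-- ===== LEMMAS AND PROOFS =====

-- "x is a term of the sequence": exactly the two tests of the loop body.
def okT (x : Int) : Bool :=
  !((PySem.Int.toChars x).any (fun ch => PySem.Chars.isIn [ch] ("0456789".toList))) &&
  !(PySem.Chars.isIn ("11".toList) (PySem.Int.toChars x))

-- valid terms in [a, b), increasing
def okIn (a b : Nat) : List Int :=
  ((List.range' a (b - a)).map Int.ofNat).filter okT

-- valid terms in [0, M), increasing
def okUpto (M : Nat) : List Int :=
  ((List.range M).map Int.ofNat).filter okT

-- ---------- decimal-string layer ----------

lemma tdc_acc (f : Nat) : ∀ (n : Nat) (acc : List Char),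
    Nat.toDigitsCore 10 f n acc = Nat.toDigitsCore 10 f n [] ++ acc := by
  induction f with
  | zero => intro n acc; simp [Nat.toDigitsCore]
  | succ f ih =>
    intro n acc
    simp only [Nat.toDigitsCore]
    by_cases h : n / 10 = 0
    · simp [h]
    · simp only [h, if_false]
      rw [ih (n/10) (Nat.digitChar (n % 10) :: acc), ih (n/10) [Nat.digitChar (n % 10)]]
      simp

lemma tdc_fuel : ∀ (n f₁ f₂ : Nat), n < f₁ → n < f₂ →
    Nat.toDigitsCore 10 f₁ n [] = Nat.toDigitsCore 10 f₂ n [] := by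
  intro n
  induction n using Nat.strong_induction_on with
  | _ n ih =>
    intro f₁ f₂ h1 h2
    match f₁, f₂ with
    | f₁ + 1, f₂ + 1 =>
      simp only [Nat.toDigitsCore]
      by_cases h : n / 10 = 0
      · simp [h]
      · simp only [h, if_false]
        rw [tdc_acc, tdc_acc f₂]
        rw [ih (n/10) (by omega) f₁ f₂ (by omega) (by omega)]

lemma toDigits_step (m d : Nat) (hm : 1 ≤ m) (hd : d < 10) :
    Nat.toDigits 10 (10 * m + d) = Nat.toDigits 10 m ++ [Nat.digitChar d] := by
  have hdiv : (10 * m + d) / 10 = m := by omega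
  have hmod : (10 * m + d) % 10 = d := by omega
  show Nat.toDigitsCore 10 (10 * m + d + 1) (10 * m + d) [] = _
  rw [Nat.toDigitsCore]
  simp only [hdiv, hmod]
  have : ¬ m = 0 := by omega
  simp only [this, if_false]
  rw [tdc_acc, tdc_fuel m (10*m+d) (m+1) (by omega) (by omega)]
  rfl

lemma toDigits_small (d : Nat) (hd : d < 10) :
    Nat.toDigits 10 d = [Nat.digitChar d] := by
  show Nat.toDigitsCore 10 (d + 1) d [] = _
  rw [Nat.toDigitsCore]
  simp [Nat.div_eq_of_lt hd, Nat.mod_eq_of_lt hd]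

lemma toChars_natCast (m : Nat) : PySem.Int.toChars (m : Int) = Nat.toDigits 10 m := by
  simp [PySem.Int.toChars]

lemma getLast_toDigits (m : Nat) (hm : 1 ≤ m) :
    (Nat.toDigits 10 m).getLast? = some (Nat.digitChar (m % 10)) := by
  by_cases h : m / 10 = 0
  · rw [show m = 10 * (m/10) + m % 10 by omega, h]
    simp only [Nat.mul_zero, Nat.zero_add]
    rw [toDigits_small _ (Nat.mod_lt _ (by omega))]
    simp
  · rw [show m = 10 * (m/10) + m % 10 by omega,
        toDigits_step _ _ (by omega) (Nat.mod_lt _ (by omega))]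
    simp

-- ---------- substring layer ----------

lemma infix_append_singleton {α : Type} {l s : List α} {c : α} :
    l <:+: s ++ [c] ↔ l <:+: s ∨ l <:+ (s ++ [c]) := by
  constructor
  · rintro ⟨t₁, t₂, h⟩
    rcases List.eq_nil_or_concat t₂ with rfl | ⟨t₂', b, rfl⟩
    · right; exact ⟨t₁, by simpa using h⟩
    · left
      rw [List.concat_eq_append, show t₁ ++ l ++ (t₂' ++ [b]) = (t₁ ++ l ++ t₂') ++ [b] by
        simp [List.append_assoc]] at h
      obtain ⟨h1, -⟩ := List.append_inj' h rfl
      exact ⟨t₁, t₂', h1⟩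
  · rintro (h | h)
    · simpa [List.concat_eq_append] using List.infix_concat (a := c) h
    · exact h.isInfix

lemma infix11 (s : List Char) (c : Char) :
    (['1','1'] <:+: s ++ [c]) ↔ (['1','1'] <:+: s) ∨ (c = '1' ∧ s.getLast? = some '1') := by
  rw [infix_append_singleton, List.suffix_concat_iff]
  constructor
  · rintro (h | (h | ⟨t, ht, hts⟩))
    · exact Or.inl h
    · simp at h
    · have ht' : (['1'] ++ ['1'] : List Char) = t ++ [c] := by simpa using ht
      have h2 := List.append_inj' ht' rfl
      have : t = ['1'] ∧ c = '1' := ⟨h2.1.symm, by simpa using h2.2.symm⟩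
      refine Or.inr ⟨this.2, ?_⟩
      rw [List.getLast?_eq_some_iff]
      obtain ⟨ys, hy⟩ := hts
      exact ⟨ys, by rw [← hy, this.1]⟩
  · rintro (h | ⟨hc, hl⟩)
    · exact Or.inl h
    · obtain ⟨ys, hy⟩ := List.getLast?_eq_some_iff.mp hl
      exact Or.inr (Or.inr ⟨['1'], by simp [hc], ys, by simp [hy]⟩)

-- ---------- okT on a digit appended ----------

lemma digitChar_eq_one (d : Nat) (h : d < 10) : (Nat.digitChar d = '1') ↔ d = 1 := by
  interval_cases d <;> simp [Nat.digitChar]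

lemma okT_ten (m d : Nat) (hm : 1 ≤ m) (hd : d < 10) :
    okT ((10*m+d : Nat) : Int) =
      (okT (m:Int) && !(PySem.Chars.isIn [Nat.digitChar d] ("0456789".toList)) &&
       !(decide (d = 1) && decide (m % 10 = 1))) := by
  have hc : PySem.Int.toChars ((10*m+d : Nat) : Int) =
      Nat.toDigits 10 m ++ [Nat.digitChar d] := by
    rw [toChars_natCast, toDigits_step m d hm hd]
  unfold okT
  rw [hc, toChars_natCast m]
  have h11 : PySem.Chars.isIn ("11".toList) (Nat.toDigits 10 m ++ [Nat.digitChar d]) =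
      (PySem.Chars.isIn ("11".toList) (Nat.toDigits 10 m) ||
        (decide (d = 1) && decide (m % 10 = 1))) := by
    rw [Bool.eq_iff_iff]
    simp only [show ("11".toList : List Char) = ['1','1'] from rfl,
      PySem.Chars.isIn_iff_infix, Bool.or_eq_true, Bool.and_eq_true, decide_eq_true_eq]
    rw [infix11]
    constructor
    · rintro (h | ⟨hc1, hl⟩)
      · exact Or.inl h
      · right
        rw [getLast_toDigits m hm] at hl
        have : Nat.digitChar (m % 10) = '1' := by injection hl
        exact ⟨(digitChar_eq_one d hd).mp hc1,
               (digitChar_eq_one _ (Nat.mod_lt _ (by omega))).mp this⟩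
    · rintro (h | ⟨h1, h2⟩)
      · exact Or.inl h
      · right
        refine ⟨(digitChar_eq_one d hd).mpr h1, ?_⟩
        rw [getLast_toDigits m hm, h2]
        rfl
  rw [List.any_append, h11, List.any_cons, List.any_nil, Bool.or_false,
     Bool.not_or, Bool.not_or]
  ac_rfl

lemma okT_c1 (m : Nat) (hm : 1 ≤ m) :
    okT ((10*m+1 : Nat) : Int) = (okT (m:Int) && !decide (m % 10 = 1)) := by
  rw [okT_ten m 1 hm (by norm_num)]
  rw [show (PySem.Chars.isIn [Nat.digitChar 1] ("0456789".toList)) = false from by decide]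
  simp

lemma okT_c2 (m : Nat) (hm : 1 ≤ m) :
    okT ((10*m+2 : Nat) : Int) = okT (m:Int) := by
  rw [okT_ten m 2 hm (by norm_num)]
  rw [show (PySem.Chars.isIn [Nat.digitChar 2] ("0456789".toList)) = false from by decide]
  simp

lemma okT_c3 (m : Nat) (hm : 1 ≤ m) :
    okT ((10*m+3 : Nat) : Int) = okT (m:Int) := by
  rw [okT_ten m 3 hm (by norm_num)]
  rw [show (PySem.Chars.isIn [Nat.digitChar 3] ("0456789".toList)) = false from by decide]
  simp

lemma okT_badd (m d : Nat) (hm : 1 ≤ m) (hd : d < 10)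
    (hbad : PySem.Chars.isIn [Nat.digitChar d] ("0456789".toList) = true) :
    okT ((10*m+d : Nat) : Int) = false := by
  rw [okT_ten m d hm hd, hbad]; simp

-- ---------- the level decomposition ----------

lemma okIn_block (m : Nat) (hm : 1 ≤ m) :
    okIn (10*m) (10*m+10) = if okT (m:Int) then childrenB (m:Int) else [] := by
  have hr : List.range' (10*m) 10 = [10*m, 10*m+1, 10*m+2, 10*m+3, 10*m+4,
      10*m+5, 10*m+6, 10*m+7, 10*m+8, 10*m+9] := by
    simp [List.range', Nat.add_assoc]
  have hmod : (PySem.Int.mod (↑m) 10 = 1) ↔ (m % 10 = 1) := by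
    rw [PySem.Int.mod_eq_emod_of_pos (by norm_num)]; omega
  have hr2 : (List.range' (10*m) 10).map Int.ofNat =
      [((10*m+0:Nat):Int), ((10*m+1:Nat):Int), ((10*m+2:Nat):Int), ((10*m+3:Nat):Int),
       ((10*m+4:Nat):Int), ((10*m+5:Nat):Int), ((10*m+6:Nat):Int), ((10*m+7:Nat):Int),
       ((10*m+8:Nat):Int), ((10*m+9:Nat):Int)] := by
    rw [hr]; norm_num
  unfold okIn childrenB
  rw [show 10*m+10-10*m = 10 by omega, hr2]
  simp only [List.filter_cons, List.filter_nil]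
  rw [okT_badd m 0 hm (by norm_num) (by decide), okT_c1 m hm, okT_c2 m hm,
      okT_c3 m hm,
      okT_badd m 4 hm (by norm_num) (by decide), okT_badd m 5 hm (by norm_num) (by decide),
      okT_badd m 6 hm (by norm_num) (by decide), okT_badd m 7 hm (by norm_num) (by decide),
      okT_badd m 8 hm (by norm_num) (by decide), okT_badd m 9 hm (by norm_num) (by decide)]
  by_cases hok : okT (m:Int) = true
  · by_cases h1 : m % 10 = 1 <;>
      · simp only [hok, h1, if_true, Bool.and_true, Bool.and_false,
          decide_true, decide_false, Bool.not_true, Bool.not_false, ne_eq, hmod,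
          Bool.or_false, not_true, not_false_iff, List.map_cons]
        norm_num
  · simp at hok
    simp [hok]

lemma okIn_append (a b c : Nat) (h1 : a ≤ b) (h2 : b ≤ c) :
    okIn a b ++ okIn b c = okIn a c := by
  unfold okIn
  have h := List.range'_append (s := a) (m := b - a) (n := c - b) (step := 1)
  rw [show a + 1 * (b - a) = b by omega] at h
  have h3 : (List.range' a (b-a)).map Int.ofNat ++
      (List.range' b (c-b)).map Int.ofNat =
      (List.range' a (c-a)).map Int.ofNat := by
    rw [← List.map_append, h, show b - a + (c - b) = c - a by omega]
  rw [← List.filter_append, h3]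

lemma okIn_cons (a b : Nat) (h : a < b) :
    okIn a b = (if okT (a:Int) then [(a:Int)] else []) ++ okIn (a+1) b := by
  unfold okIn
  rw [show b - a = (b - (a+1)) + 1 by omega, List.range'_succ]
  simp only [List.map_cons, List.filter_cons]
  by_cases hok : okT (a:Int) = true <;> simp [hok]

lemma level_step : ∀ (t a : Nat), 1 ≤ a →
    (okIn a (a+t)).flatMap childrenB = okIn (10*a) (10*a+10*t) := by
  intro t
  induction t with
  | zero =>
    intro a ha
    unfold okIn
    simp
  | succ t ih =>
    intro a ha
    rw [okIn_cons a (a+(t+1)) (by omega), List.flatMap_append,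
        show a + (t+1) = (a+1) + t by omega, ih (a+1) (by omega)]
    have hblock : ((if okT (a:Int) then [(a:Int)] else []).flatMap childrenB)
        = okIn (10*a) (10*a+10) := by
      rw [okIn_block a ha]
      by_cases hok : okT (a:Int) = true <;> simp [hok]
    rw [hblock, show 10*(a+1) = 10*a+10 by omega,
        show 10*a+10*(t+1) = 10*a+10+10*t by ring]
    exact okIn_append (10*a) (10*a+10) ((10*a+10)+10*t) (by omega) (by omega)

-- ---------- okUpto facts ----------

lemma okUpto_eq_okIn (M : Nat) : okUpto M = okIn 0 M := by
  unfold okUpto okIn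
  rw [List.range_eq_range', Nat.sub_zero]

lemma okUpto_split (M M' : Nat) (h : M ≤ M') :
    okUpto M' = okUpto M ++ okIn M M' := by
  rw [okUpto_eq_okIn, okUpto_eq_okIn, okIn_append 0 M M' (by omega) h]

lemma okUpto_succ (m : Nat) :
    okUpto (m+1) = okUpto m ++ (if okT (m:Int) then [(m:Int)] else []) := by
  rw [okUpto_split m (m+1) (by omega), okIn_cons m (m+1) (by omega)]
  unfold okIn
  simp

lemma okUpto_len_mono (M M' : Nat) (h : M ≤ M') :
    (okUpto M).length ≤ (okUpto M').length := by
  rw [okUpto_split M M' h]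
  simp

lemma okUpto_getD_stable (M M' i : Nat) (h : M ≤ M') (hi : i < (okUpto M).length) :
    (okUpto M').getD i 0 = (okUpto M).getD i 0 := by
  rw [okUpto_split M M' h, List.getD_append _ _ _ _ hi]

-- ---------- the all-twos witnesses: each level is nonempty ----------

def twos : Nat → Nat
  | 0 => 0
  | k+1 => 10 * twos k + 2

lemma twos_bounds : ∀ k, 10^k ≤ twos (k+1) ∧ twos (k+1) < 10^(k+1) := by
  intro k
  induction k with
  | zero => simp [twos]
  | succ k ih =>
    show 10^(k+1) ≤ 10 * twos (k+1) + 2 ∧ 10 * twos (k+1) + 2 < 10^(k+2)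
    rw [pow_succ, pow_succ]
    omega

lemma twos_ok : ∀ k, okT ((twos (k+1) : Nat) : Int) = true := by
  intro k
  induction k with
  | zero => show okT ((2:Nat):Int) = true; decide
  | succ k ih =>
    show okT ((10 * twos (k+1) + 2 : Nat) : Int) = true
    rw [okT_c2 (twos (k+1)) (le_trans (Nat.one_le_pow _ _ (by norm_num)) (twos_bounds k).1)]
    exact ih

lemma okIn_pow_ne_nil (L : Nat) : okIn (10^L) (10^(L+1)) ≠ [] := by
  have hb := twos_bounds L
  have hmm : twos (L+1) ∈ List.range' (10^L) (10^(L+1) - 10^L) := by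
    rw [List.mem_range'_1]
    have h10 : (10:Nat)^L ≤ 10^(L+1) := Nat.pow_le_pow_right (by omega) (by omega)
    omega
  have hmem : ((twos (L+1) : Nat) : Int) ∈ okIn (10^L) (10^(L+1)) := by
    unfold okIn
    exact List.mem_filter.mpr ⟨List.mem_map.mpr ⟨_, hmm, rfl⟩, twos_ok L⟩
  exact List.ne_nil_of_mem hmem

lemma okUpto_pow_len (L : Nat) : L ≤ (okUpto (10^L)).length := by
  induction L with
  | zero => omega
  | succ L ih =>
    rw [okUpto_split (10^L) (10^(L+1)) (Nat.pow_le_pow_right (by omega) (by omega))]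
    rw [List.length_append]
    have : 1 ≤ (okIn (10^L) (10^(L+1))).length :=
      List.length_pos_of_ne_nil (okIn_pow_ne_nil L)
    omega

-- ---------- A's loop ----------

lemma loopA_stop (n : Int) (f : Nat) (count x : Int) (h : ¬ count < n) :
    nthLoopA n f count x = x := by
  cases f <;> simp [nthLoopA, h]

lemma loopA_main : ∀ (fuel m : Nat) (n' : Nat),
    (okUpto (m+1)).length < n' → n' ≤ (okUpto (m+1+fuel)).length →
    nthLoopA (n' : Int) fuel ((okUpto (m+1)).length : Int) (m : Int)
      = (okUpto (m+1+fuel)).getD (n'-1) 0 := by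
  intro fuel
  induction fuel with
  | zero =>
    intro m n' hlt hle
    simp only [Nat.add_zero] at hle
    omega
  | succ fuel ih =>
    intro m n' hlt hle
    have hcl : (((okUpto (m+1)).length : Int) < (n' : Int)) := by exact_mod_cast hlt
    show nthLoopA (n' : Int) (fuel+1) _ _ = _
    rw [nthLoopA]
    simp only [hcl, if_true]
    have hx : ((m : Int) + 1) = ((m+1 : Nat) : Int) := by push_cast; ring
    rw [hx]
    have hshape : ∀ z : List Int, z = okUpto (m+1+(fuel+1)) →
        (if (PySem.Int.toChars ((m+1 : Nat) : Int)).any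
              (fun ch => PySem.Chars.isIn [ch] ("0456789".toList))
         then nthLoopA (n' : Int) fuel ((okUpto (m+1)).length : Int) ((m+1 : Nat) : Int)
         else if PySem.Chars.isIn ("11".toList) (PySem.Int.toChars ((m+1 : Nat) : Int))
         then nthLoopA (n' : Int) fuel ((okUpto (m+1)).length : Int) ((m+1 : Nat) : Int)
         else nthLoopA (n' : Int) fuel (((okUpto (m+1)).length : Int) + 1) ((m+1 : Nat) : Int))
        = z.getD (n'-1) 0 := by
      intro z hz
      subst hz
      by_cases hok : okT ((m+1 : Nat) : Int) = true
      · have hng : ((PySem.Int.toChars ((m+1 : Nat) : Int)).any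
            (fun ch => PySem.Chars.isIn [ch] ("0456789".toList))) = false ∧
            PySem.Chars.isIn ("11".toList) (PySem.Int.toChars ((m+1 : Nat) : Int)) = false := by
          unfold okT at hok
          constructor <;> [skip; skip] <;>
            (revert hok
             cases ((PySem.Int.toChars ((m+1 : Nat) : Int)).any
               (fun ch => PySem.Chars.isIn [ch] ("0456789".toList))) <;>
             cases (PySem.Chars.isIn ("11".toList) (PySem.Int.toChars ((m+1 : Nat) : Int))) <;>
             simp)
        rw [hng.1, hng.2]
        simp only [if_false, Bool.false_eq_true]
        have hlen2 : (okUpto (m+2)).length = (okUpto (m+1)).length + 1 := by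
          rw [okUpto_succ (m+1), hok]
          simp
        by_cases hlt2 : (okUpto (m+2)).length < n'
        · have : (((okUpto (m+1)).length : Int) + 1) = ((okUpto (m+1+1)).length : Int) := by
            rw [show m+1+1 = m+2 by omega, hlen2]; push_cast; ring
          rw [this]
          have := ih (m+1) n' (by rw [show m+1+1 = m+2 by omega]; exact hlt2)
            (by rw [show m+1+1+fuel = m+1+(fuel+1) by omega]; exact hle)
          rw [this, show m+1+1+fuel = m+1+(fuel+1) by omega]
        · -- n' = count+1 : the loop stops at the next test, both at fuel 0 and fuel > 0
          have hn' : n' = (okUpto (m+1)).length + 1 := by omega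
          rw [loopA_stop _ _ _ _ (by
            rw [hn']
            push_cast
            omega)]
          have hpre : okUpto (m+2) = okUpto (m+1) ++ [((m+1:Nat) : Int)] := by
            rw [okUpto_succ (m+1), hok]
            simp
          have hidx : (okUpto (m+1+(fuel+1))).getD (n'-1) 0 = ((m+1:Nat) : Int) := by
            rw [okUpto_getD_stable (m+2) (m+1+(fuel+1)) (n'-1) (by omega)
                (by rw [hlen2]; omega)]
            rw [hpre, hn']
            simp only [Nat.add_sub_cancel]
            rw [List.getD_eq_getElem?_getD, List.getElem?_concat_length]
            rfl
          rw [hidx]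
      · have hok' : okT ((m+1 : Nat) : Int) = false := by
          revert hok; cases okT ((m+1 : Nat) : Int) <;> simp
        have hlen2 : (okUpto (m+2)).length = (okUpto (m+1)).length := by
          rw [okUpto_succ (m+1), hok']
          simp
        have hrec : nthLoopA (n' : Int) fuel ((okUpto (m+1)).length : Int) ((m+1 : Nat) : Int)
            = (okUpto (m+1+(fuel+1))).getD (n'-1) 0 := by
          have : ((okUpto (m+1)).length : Int) = ((okUpto (m+1+1)).length : Int) := by
            rw [show m+1+1 = m+2 by omega, hlen2]
          rw [this]
          have := ih (m+1) n' (by rw [show m+1+1 = m+2 by omega, hlen2]; exact hlt)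
            (by rw [show m+1+1+fuel = m+1+(fuel+1) by omega]; exact hle)
          rw [this, show m+1+1+fuel = m+1+(fuel+1) by omega]
        by_cases h1 : ((PySem.Int.toChars ((m+1 : Nat) : Int)).any
            (fun ch => PySem.Chars.isIn [ch] ("0456789".toList))) = true
        · rw [h1]; simp only [if_true]; exact hrec
        · have h1' : ((PySem.Int.toChars ((m+1 : Nat) : Int)).any
              (fun ch => PySem.Chars.isIn [ch] ("0456789".toList))) = false := by
            revert h1; cases ((PySem.Int.toChars ((m+1 : Nat) : Int)).any
              (fun ch => PySem.Chars.isIn [ch] ("0456789".toList))) <;> simp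
          have h2 : PySem.Chars.isIn ("11".toList) (PySem.Int.toChars ((m+1 : Nat) : Int))
              = true := by
            unfold okT at hok'
            revert hok'
            rw [h1']
            cases (PySem.Chars.isIn ("11".toList) (PySem.Int.toChars ((m+1 : Nat) : Int))) <;> simp
          rw [h1', h2]
          simp only [Bool.false_eq_true, if_false, if_true]
          exact hrec
    exact hshape _ rfl

-- ---------- B's loop ----------

lemma loopB_main : ∀ (k' : Nat), ∀ (L n' : Nat), 1 ≤ k' →
    k' + (okUpto (10^L)).length = n' →
    ∃ M, n' ≤ (okUpto M).length ∧
      nthLoopB (k' : Int) (okIn (10^L) (10^(L+1))) = (okUpto M).getD (n'-1) 0 := by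
  intro k'
  induction k' using Nat.strong_induction_on with
  | _ k' ih =>
    intro L n' hk hsum
    have hne := okIn_pow_ne_nil L
    have hlen1 : 1 ≤ (okIn (10^L) (10^(L+1))).length := List.length_pos_of_ne_nil hne
    rw [nthLoopB]
    simp only [hne, if_false]
    simp only [PySem.List.len_eq]
    by_cases hle : (k' : Int) ≤ ((okIn (10^L) (10^(L+1))).length : Int)
    · -- return level[k'-1]
      have hkle : k' ≤ (okIn (10^L) (10^(L+1))).length := by exact_mod_cast hle
      refine ⟨10^(L+1), ?_, ?_⟩
      · rw [okUpto_split (10^L) (10^(L+1)) (Nat.pow_le_pow_right (by omega) (by omega)),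
            List.length_append]
        omega
      · simp only [hle, if_true]
        have hki : ((k' : Int) - 1) = ((k' - 1 : Nat) : Int) := by omega
        rw [hki, PySem.List.pyGet?_natCast]
        rw [okUpto_split (10^L) (10^(L+1)) (Nat.pow_le_pow_right (by omega) (by omega))]
        rw [List.getD_eq_getElem?_getD,
            show n' - 1 = (okUpto (10^L)).length + (k' - 1) by omega]
        rw [List.getElem?_append_right
          (by omega : (okUpto (10^L)).length ≤ (okUpto (10^L)).length + (k'-1))]
        rw [show (okUpto (10^L)).length + (k'-1) - (okUpto (10^L)).length = k'-1 by omega]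
    · -- recurse to the next level
      simp only [hle, if_false]
      have hkgt : (okIn (10^L) (10^(L+1))).length < k' := by
        by_contra hcon
        exact hle (by exact_mod_cast Nat.not_lt.mp hcon)
      have hflat : (okIn (10^L) (10^(L+1))).flatMap childrenB
          = okIn (10^(L+1)) (10^(L+2)) := by
        have := level_step (10^(L+1) - 10^L) (10^L) (Nat.one_le_iff_ne_zero.mpr (by positivity))
        rw [show 10^L + (10^(L+1) - 10^L) = 10^(L+1) by
              have : (10:Nat)^L ≤ 10^(L+1) := Nat.pow_le_pow_right (by omega) (by omega)
              omega] at this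
        rw [this]
        congr 1
        · rw [pow_succ]; ring
        · have h1 : (10:Nat)^L ≤ 10^(L+1) := Nat.pow_le_pow_right (by omega) (by omega)
          rw [pow_succ, pow_succ]
          omega
      have hki : ((k' : Int) - ((okIn (10^L) (10^(L+1))).length : Int))
          = ((k' - (okIn (10^L) (10^(L+1))).length : Nat) : Int) := by omega
      rw [hflat, hki]
      have hnext : (k' - (okIn (10^L) (10^(L+1))).length) + (okUpto (10^(L+1))).length = n' := by
        rw [okUpto_split (10^L) (10^(L+1)) (Nat.pow_le_pow_right (by omega) (by omega)),
            List.length_append]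
        omega
      exact ih (k' - (okIn (10^L) (10^(L+1))).length) (by omega) (L+1) n' (by omega) hnext

-- ===== VERDICT (by name: the statement is the Claim_ definition above) =====
theorem nth_term_spec : Claim_equal_nth_term := by
  unfold Claim_equal_nth_term Spec_nth_term
  intro n _ hpre
  unfold Pre_nth_term at hpre
  have hn : ¬ n < 1 := by omega
  set n' : Nat := n.toNat with hn'
  have hcast : n = (n' : Int) := by omega
  -- A's side
  have hA : nth_term n = (okUpto (1 + 10^n')).getD (n'-1) 0 := by
    unfold nth_term
    rw [if_neg hn]
    have h0 : okUpto 1 = [] := by decide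
    have hbound : n' ≤ (okUpto (0+1+10^n')).length := by
      calc n' ≤ (okUpto (10^n')).length := okUpto_pow_len n'
      _ ≤ (okUpto (0+1+10^n')).length := okUpto_len_mono _ _ (by omega)
    have := loopA_main (10^n') 0 n' (by simp [h0]; omega) hbound
    rw [h0] at this
    simp only [List.length_nil, Nat.cast_zero] at this
    rw [hcast] at *
    simpa [show (0:Nat)+1+10^n' = 1+10^n' by omega] using this
  -- B's side
  have hB : ∃ M, n' ≤ (okUpto M).length ∧ nth_term_alt n = (okUpto M).getD (n'-1) 0 := by
    unfold nth_term_alt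
    rw [if_neg hn]
    have h10 : okIn (10^0) (10^(0+1)) = [1, 2, 3] := by decide
    have h1 : (okUpto (10^0)).length = 0 := by decide
    obtain ⟨M, hM1, hM2⟩ := loopB_main n' 0 n' (by omega) (by omega)
    rw [h10] at hM2
    exact ⟨M, hM1, by rw [hcast, hM2]⟩
  obtain ⟨M, hM1, hM2⟩ := hB
  rw [hA, hM2]
  have hA' : n' ≤ (okUpto (1 + 10^n')).length := by
    calc n' ≤ (okUpto (10^n')).length := okUpto_pow_len n'
    _ ≤ _ := okUpto_len_mono _ _ (by omega)
  rw [← okUpto_getD_stable (1+10^n') (max (1+10^n') M) (n'-1) (le_max_left _ _) (by omega),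
      ← okUpto_getD_stable M (max (1+10^n') M) (n'-1) (le_max_right _ _) (by omega)]
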